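-- pv_equiv track=rewrite | github.com/MEPalma/HLNN-ReplicationPackage | src/main/python/highlighter/utils.py | __lookup_indexes_of_source__
-- ===== SOURCE A (Python) =====
-- def __lookup_indexes_of_source__(source: str):
--     lookup_indexes = {}
--     tmp_index = 0
--     for line_index, line in enumerate(source.split('\n')):
--         lsi = tmp_index
--         lei = lsi + len(line)
--         lookup_indexes[line_index] = (line, lsi, lei)
--         tmp_index = lei + 1
--     return lookup_indexes
-- ===== SOURCE B (Python) =====
-- def __lookup_indexes_of_source__(source: str):
--     # Scan once for newline positions instead of splitting and keeping a running index:
--     # line i spans [starts[i], starts[i+1]-1), the final sentinel bound being len(source)+1.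
--     bounds = [0] + [j + 1 for j, c in enumerate(source) if c == '\n'] + [len(source) + 1]
--     return {
--         i: (source[s:e - 1], s, e - 1)
--         for i, (s, e) in enumerate(zip(bounds, bounds[1:]))
--     }
-- ===== Notes on version B (the rewrite author's own statement) =====
-- stated objective: alternative
-- what changed: Instead of splitting on newlines and threading a running offset through a stateful dict-building loop, B scans the string once for newline positions, forms the list of line boundaries, and assembles each line's text and offsets directly from consecutive boundary pairs.
import Mathlib
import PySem

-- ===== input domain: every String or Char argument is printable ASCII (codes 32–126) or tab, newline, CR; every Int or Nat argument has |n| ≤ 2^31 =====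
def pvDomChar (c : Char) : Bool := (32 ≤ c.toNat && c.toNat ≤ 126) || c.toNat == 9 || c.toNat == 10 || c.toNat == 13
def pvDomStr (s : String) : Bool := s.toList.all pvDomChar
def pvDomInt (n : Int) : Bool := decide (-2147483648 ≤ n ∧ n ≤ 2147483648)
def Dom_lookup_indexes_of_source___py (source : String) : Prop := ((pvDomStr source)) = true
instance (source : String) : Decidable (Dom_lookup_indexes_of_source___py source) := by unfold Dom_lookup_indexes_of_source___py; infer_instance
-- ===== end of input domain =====

-- B replaces A's split-then-running-offset loop by a single scan for newline positions,
-- from which every line's text and offsets are read off directly (objective: alternative).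

-- ===== PORT A =====
-- A: lookup_indexes = {}; tmp_index = 0;
--    for line_index, line in enumerate(source.split('\n')): lsi = tmp_index; lei = lsi + len(line);
--        lookup_indexes[line_index] = (line, lsi, lei); tmp_index = lei + 1
def lookup_indexes_of_source___py (source : String) : List (Int × String × Int × Int) :=
  let lines := PySem.Chars.splitOn source.toList ['\n']  -- source.split('\n'); sep is the nonempty literal '\n'
  let r := (PySem.List.enumerate lines 0).foldl
    (fun (st : PySem.Dict Int (String × Int × Int) × Int) p =>
      let lsi := st.2
      let lei := lsi + PySem.Chars.len p.2
      (st.1.insert p.1 (String.ofList p.2, lsi, lei), lei + 1))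
    (PySem.Dict.empty, 0)
  r.1.items

-- ===== PORT B =====
-- B: bounds = [0] + [j + 1 for j, c in enumerate(source) if c == '\n'] + [len(source) + 1]
--    return {i: (source[s:e-1], s, e-1) for i, (s, e) in enumerate(zip(bounds, bounds[1:]))}
def lookup_indexes_of_source___py_alt (source : String) : List (Int × String × Int × Int) :=
  let bounds : List Int :=
    0 :: ((PySem.List.enumerate source.toList 0).filterMap
            (fun p => if p.2 = '\n' then some (p.1 + 1) else none)
          ++ [PySem.Str.len source + 1])
  (PySem.List.enumerate (bounds.zip (PySem.List.slice bounds (some 1) none)) 0).map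
    (fun q => (q.1, PySem.Str.slice source (some q.2.1) (some (q.2.2 - 1)), q.2.1, q.2.2 - 1))

-- ===== PRECONDITION & SPEC =====
def Spec_lookup_indexes_of_source___py (source : String) (out : List (Int × String × Int × Int)) : Prop := out = lookup_indexes_of_source___py_alt source
instance (source : String) (out : List (Int × String × Int × Int)) : Decidable (Spec_lookup_indexes_of_source___py source out) := by unfold Spec_lookup_indexes_of_source___py; infer_instance

-- ===== CLAIM (what is proved, stated in full; the proofs are below) =====
def Claim_equal_lookup_indexes_of_source___py : Prop := ∀ (source : String), Dom_lookup_indexes_of_source___py source → Spec_lookup_indexes_of_source___py source (lookup_indexes_of_source___py source)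

-- ===== LEMMAS AND PROOFS =====

-- The common reference shape: one record per line, with index, text, start and end offsets.
def pvBuild : List (List Char) → Int → Int → List (Int × String × Int × Int)
  | [], _, _ => []
  | l :: ls, i, t =>
      (i, String.ofList l, t, t + (l.length : Int)) :: pvBuild ls (i + 1) (t + (l.length : Int) + 1)

-- B's newline scan (the filterMap of its comprehension), with a general enumerate start.
def pvNL (cs : List Char) (off : Int) : List Int :=
  (PySem.List.enumerate cs off).filterMap (fun p => if p.2 = '\n' then some (p.1 + 1) else none)

theorem pv_go_single (c : Char) : ∀ (fuel : Nat) (l cur : List Char) (acc : List (List Char)),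
    l.length < fuel →
    PySem.Chars.splitOn.go [c] fuel l cur acc
      = acc.reverse ++ List.modifyHead (cur.reverse ++ ·) (List.splitOnP (· == c) l) := by
  intro fuel
  induction fuel with
  | zero => intro l cur acc h; omega
  | succ f ih =>
    intro l cur acc h
    cases l with
    | nil =>
      simp [PySem.Chars.splitOn.go, List.splitOnP_nil]
    | cons x rest =>
      rw [PySem.Chars.splitOn.go]
      by_cases hx : x = c
      · subst hx
        have hpre : List.isPrefixOf [x] (x :: rest) = true := by simp [List.isPrefixOf]
        rw [if_pos hpre]
        rw [ih _ _ _ (by simp at h ⊢; omega)]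
        rcases hsp : List.splitOnP (· == x) rest with _ | ⟨a, t⟩
        · exact absurd hsp (List.splitOnP_ne_nil _ _)
        · simp [List.splitOnP_cons, hsp]
      · have hpre : List.isPrefixOf [c] (x :: rest) = false := by
          simp [List.isPrefixOf]; exact fun hh => absurd hh.symm hx
        rw [if_neg (by simp [hpre])]
        rw [ih _ _ _ (by simp at h ⊢; omega)]
        rcases hsp : List.splitOnP (· == c) rest with _ | ⟨a, t⟩
        · exact absurd hsp (List.splitOnP_ne_nil _ _)
        · simp [List.splitOnP_cons, hsp, hx]

theorem pv_splitOn_single (cs : List Char) (c : Char) :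
    PySem.Chars.splitOn cs [c] = List.splitOnP (· == c) cs := by
  unfold PySem.Chars.splitOn
  rw [pv_go_single c (cs.length + 1) cs [] [] (by omega)]
  rcases hsp : List.splitOnP (· == c) cs with _ | ⟨a, t⟩
  · exact absurd hsp (List.splitOnP_ne_nil _ _)
  · simp

theorem pv_A_fold : ∀ (lines : List (List Char)) (d : PySem.Dict Int (String × Int × Int)) (i t : Int),
    (∀ k ∈ d.keys, k < i) →
    ((PySem.List.enumerate lines i).foldl
        (fun (st : PySem.Dict Int (String × Int × Int) × Int) p =>
          let lsi := st.2
          let lei := lsi + PySem.Chars.len p.2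
          (st.1.insert p.1 (String.ofList p.2, lsi, lei), lei + 1))
        (d, t)).1.items
      = d.items ++ pvBuild lines i t := by
  intro lines
  induction lines with
  | nil => intro d i t _; simp [PySem.List.enumerate_nil, pvBuild]
  | cons l ls ih =>
    intro d i t hinv
    have hcon : d.contains i = false := by
      rcases h : d.contains i with _ | _
      · rfl
      · exact absurd (hinv i ((PySem.Dict.contains_iff_mem_keys d i).mp h)) (lt_irrefl i)
    rw [PySem.List.enumerate_cons, List.foldl_cons]
    simp only
    rw [ih _ _ _ (by
      intro k hk
      rw [PySem.Dict.keys_insert_of_not_contains _ _ hcon] at hk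
      rcases List.mem_append.mp hk with h1 | h2
      · exact lt_trans (hinv k h1) (by omega)
      · simp at h2; omega)]
    rw [PySem.Dict.items_insert_of_not_contains _ _ hcon]
    simp [pvBuild, PySem.Chars.len_eq]

theorem pv_nl_nil (cs : List Char) (off : Int) (h : '\n' ∉ cs) : pvNL cs off = [] := by
  unfold pvNL
  rw [List.filterMap_eq_nil_iff]
  intro p hp
  rcases (PySem.List.mem_enumerate_iff cs off p).mp hp with ⟨k, hk, rfl⟩
  simp only
  rw [if_neg]
  intro hc
  exact h (hc ▸ List.getElem_mem hk)

theorem pv_splitOnP_append (l0 rest : List Char) (h : ∀ x ∈ l0, (x == '\n') = false) :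
    List.splitOnP (· == '\n') (l0 ++ '\n' :: rest) = l0 :: List.splitOnP (· == '\n') rest := by
  induction l0 with
  | nil => simp [List.splitOnP_cons]
  | cons x xs ih =>
    have hx := h x (by simp)
    rw [List.cons_append, List.splitOnP_cons, if_neg (by simp [hx])]
    rw [ih (fun y hy => h y (by simp [hy]))]
    simp

theorem pv_nl_cons (l0 rest : List Char) (off : Int) (h : '\n' ∉ l0) :
    pvNL (l0 ++ '\n' :: rest) off
      = (off + (l0.length : Int) + 1) :: pvNL rest (off + (l0.length : Int) + 1) := by
  unfold pvNL
  rw [PySem.List.enumerate_append, List.filterMap_append, PySem.List.enumerate_cons,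
    List.filterMap_cons]
  have h0 : pvNL l0 off = [] := pv_nl_nil l0 off h
  unfold pvNL at h0
  rw [h0]
  simp

theorem pv_B_main : ∀ (n : Nat) (full cs : List Char) (off i : Int),
    cs.length = n → 0 ≤ off → cs = full.drop off.toNat →
    (PySem.List.enumerate
        ((off :: (pvNL cs off ++ [off + (cs.length : Int) + 1])).zip
          (pvNL cs off ++ [off + (cs.length : Int) + 1])) i).map
      (fun q => (q.1, String.ofList (PySem.List.slice full (some q.2.1) (some (q.2.2 - 1))), q.2.1, q.2.2 - 1))
      = pvBuild (List.splitOnP (· == '\n') cs) i off := by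
  intro n
  induction n using Nat.strong_induction_on with
  | _ n ih =>
  intro full cs off i hn hoff hdrop

  by_cases hm : '\n' ∈ cs
  · -- cs = l0 ++ '\n' :: rest
    have hcat := List.takeWhile_append_dropWhile (p := fun x => !(x == '\n')) (l := cs)
    set l0 := cs.takeWhile (fun x => !(x == '\n')) with hl0
    set dw := cs.dropWhile (fun x => !(x == '\n')) with hdw
    have hl0nn : '\n' ∉ l0 := by
      intro hx
      have := List.mem_takeWhile_imp hx
      simp at this
    have hdw_ne : dw ≠ [] := by
      intro h0
      rw [h0, List.append_nil] at hcat
      exact hl0nn (hcat ▸ hm)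
    obtain ⟨y, ys, hys⟩ := List.exists_cons_of_ne_nil hdw_ne
    have h' : List.dropWhile (fun x => !(x == '\n')) cs = y :: ys := by rw [← hdw]; exact hys
    have hy : y = '\n' := by
      have := List.head_dropWhile_not (fun x => !(x == '\n')) (l := cs)
        (by rw [h']; exact List.cons_ne_nil y ys)
      simp only [h', List.head_cons] at this
      simpa using this
    have hcs : cs = l0 ++ '\n' :: ys := by rw [← hcat, hys, hy]
    have hlen : (cs.length : Int) = l0.length + 1 + ys.length := by
      rw [hcs]; simp; omega
    have hm1 : off + (cs.length : Int) + 1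
        = (off + (l0.length : Int) + 1) + (ys.length : Int) + 1 := by omega
    set m := off + (l0.length : Int) + 1 with hmdef
    have hnl : pvNL cs off = m :: pvNL ys m := by rw [hcs]; exact pv_nl_cons l0 ys off hl0nn
    have hdrop' : ys = full.drop m.toNat := by
      have hmt : m.toNat = off.toNat + (l0.length + 1) := by omega
      rw [hmt, ← List.drop_drop, ← hdrop, hcs,
        show l0 ++ '\n' :: ys = (l0 ++ ['\n']) ++ ys by simp,
        List.drop_left' (by simp)]
    have htail := ih ys.length (by rw [← hn, hcs]; simp; omega) full ys m (i + 1) rfl (by omega) hdrop'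
    have hsp : List.splitOnP (· == '\n') cs = l0 :: List.splitOnP (· == '\n') ys := by
      rw [hcs]
      exact pv_splitOnP_append l0 ys (fun x hx => by
        rcases hb : (x == '\n') with _ | _
        · rfl
        · exact absurd ((beq_iff_eq).mp hb ▸ hx) hl0nn)
    have hm2 : m - 1 = off + (l0.length : Int) := by omega
    have hsl0 : PySem.List.slice full (some off) (some (off + (l0.length : Int))) = l0 := by
      rw [PySem.List.slice_toNat full hoff (by omega)]
      have h1 : (off + (l0.length : Int)).toNat - off.toNat = l0.length := by omega
      rw [h1, ← hdrop]
      exact (List.prefix_iff_eq_take.mp (List.takeWhile_prefix _)).symm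
    rw [hnl, hm1, hsp]
    simp only [List.cons_append, List.zip_cons_cons, PySem.List.enumerate_cons, List.map_cons, pvBuild]
    rw [hm2, hsl0, htail, hmdef]
  · rw [pv_nl_nil cs off hm]
    rw [List.splitOnP_eq_single (· == '\n') cs (by intro x hx hb; simp at hb; exact hm (hb ▸ hx))]
    simp only [List.nil_append, List.zip_cons_cons, List.zip_nil_right,
      PySem.List.enumerate_cons, PySem.List.enumerate_nil, List.map_cons, List.map_nil]
    rw [pvBuild, pvBuild]
    have he : off + (cs.length : Int) + 1 - 1 = off + (cs.length : Int) := by ring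
    rw [he]
    have hsl : PySem.List.slice full (some off) (some (off + (cs.length : Int)))
        = cs := by
      rw [PySem.List.slice_toNat full hoff (by omega)]
      have : (off + (cs.length : Int)).toNat - off.toNat = cs.length := by omega
      rw [this, ← hdrop, List.take_length]
    rw [hsl]

theorem pv_str_slice (s : String) (a b : Option Int) :
    PySem.Str.slice s a b = String.ofList (PySem.List.slice s.toList a b) := by
  apply String.toList_inj.mp
  simp [PySem.Str.toList_slice, PySem.Chars.slice_eq_listSlice, String.toList_ofList]

-- ===== VERDICT (by name: the statement is the Claim_ definition above) =====
theorem lookup_indexes_of_source___py_spec : Claim_equal_lookup_indexes_of_source___py := by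
  intro source _
  unfold Spec_lookup_indexes_of_source___py
  unfold lookup_indexes_of_source___py lookup_indexes_of_source___py_alt
  rw [pv_A_fold _ _ _ _ (by simp [PySem.Dict.keys_empty])]
  rw [pv_splitOn_single]
  simp only [PySem.List.slice_from_one, List.tail_cons, PySem.Str.len_eq, pv_str_slice]
  have h := pv_B_main source.toList.length source.toList source.toList 0 0 rfl (le_refl 0) (by simp)
  simp only [zero_add] at h
  rw [show ((PySem.List.enumerate source.toList 0).filterMap
        (fun p => if p.2 = '\n' then some (p.1 + 1) else none)) = pvNL source.toList 0 from rfl]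
  rw [h]
  rfl
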